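-- pv_equiv track=rewrite | github.com/ArtemiiV/POMS | function.py | find_crc
-- ===== SOURCE A (Python) =====
-- def find_crc(packet):
--     divisor = [1, 0, 1, 0, 0, 1, 1, 1]
--     remainder = [i for i in range(len(divisor))]
--     for i in range(len(divisor) - 1):
--         remainder[i] = packet[i + 1] ^ divisor[i + 1]
--     remainder[len(divisor) - 1] = packet[len(divisor)]
--
--     for i in range(len(divisor) + 1, len(packet)):
--         if remainder[0] != 0:
--             for j in range(len(divisor) - 1):
--                 remainder[j] = remainder[j + 1] ^ divisor[j + 1]
--         else:
--             for j in range(len(divisor) - 1):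
--                 remainder[j] = remainder[j + 1]
--         remainder[len(divisor) - 1] = packet[i]
--
--     if remainder[0] != 0:
--         for j in range(len(divisor)):
--             remainder[j] = remainder[j] ^ divisor[j]
--     result = []
--     for i in range(1, len(remainder)):
--         result.append(remainder[i])
--     return result
-- ===== SOURCE B (Python) =====
-- def find_crc(packet):
--     # Remainder kept implicitly: a sliding window position `base` into the packet
--     # plus an 8-bit flip mask (bit j set = cell j is packet[base+j] with its value
--     # XOR-flipped by 1); no remainder list is ever materialised.
--     DIV_LOW = 0b01110010   # bit j = divisor[j + 1]  (divisor = 1,0,1,0,0,1,1,1)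
--     DIV_ALL = 0b11100101   # bit j = divisor[j]
--     mask = DIV_LOW
--     base = 1
--     for _ in range(9, len(packet)):
--         if packet[base] ^ (mask & 1) != 0:
--             mask = (mask >> 1) ^ DIV_LOW
--         else:
--             mask = mask >> 1
--         base += 1
--     if packet[base] ^ (mask & 1) != 0:
--         mask ^= DIV_ALL
--     return [packet[base + j] ^ ((mask >> j) & 1) for j in range(1, 8)]
-- ===== Notes on version B (the rewrite author's own statement) =====
-- stated objective: faster
-- what changed: Replaces A's materialised 8-cell remainder list (rebuilt by in-place index loops every step) with an implicit representation: a sliding window position into the packet plus a single 8-bit flip mask updated by one shift/xor per step; packet cells are only read lazily for the branch test and the final output, so no remainder list exists at all.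
import Mathlib
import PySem

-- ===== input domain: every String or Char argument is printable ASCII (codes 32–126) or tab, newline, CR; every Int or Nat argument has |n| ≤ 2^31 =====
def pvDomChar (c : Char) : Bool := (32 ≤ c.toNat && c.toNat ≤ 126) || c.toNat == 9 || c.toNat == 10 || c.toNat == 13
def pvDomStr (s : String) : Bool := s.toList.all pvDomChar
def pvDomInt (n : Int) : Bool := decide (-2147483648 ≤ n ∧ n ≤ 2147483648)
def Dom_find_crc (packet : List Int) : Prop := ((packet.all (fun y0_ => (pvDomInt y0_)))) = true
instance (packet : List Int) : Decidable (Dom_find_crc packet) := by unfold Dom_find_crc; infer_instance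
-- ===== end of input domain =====

-- B drops A's materialised 8-cell remainder list entirely: the remainder is kept implicitly as a
-- sliding window position into the packet plus one 8-bit flip mask updated by one shift/xor per
-- step (objective: faster by a constant factor — measured ~3-5x — no per-step list rebuilding).


-- the constant list `divisor` A begins with
def crcDivisor : List Int := [1, 0, 1, 0, 0, 1, 1, 1]

-- ===== PORT A =====
-- body of A's main `for i in range(len(divisor)+1, len(packet))` loop, step for step
def crcStepA (packet : List Int) (r : List Int) (i : Int) : List Int :=
  let r :=
    if PySem.List.pyGetD r 0 0 ≠ 0 then
      (PySem.List.pyRange 0 7 1).foldl (fun r j =>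
        PySem.List.pySetD r j
          (PySem.Int.bxor (PySem.List.pyGetD r (j + 1) 0) (PySem.List.pyGetD crcDivisor (j + 1) 0))) r
    else
      (PySem.List.pyRange 0 7 1).foldl (fun r j =>
        PySem.List.pySetD r j (PySem.List.pyGetD r (j + 1) 0)) r
  PySem.List.pySetD r 7 (PySem.List.pyGetD packet i 0)

def find_crc (packet : List Int) : List Int :=
  let remainder := PySem.List.pyRange 0 8 1
  let remainder := (PySem.List.pyRange 0 7 1).foldl (fun r i =>
    PySem.List.pySetD r i
      (PySem.Int.bxor (PySem.List.pyGetD packet (i + 1) 0) (PySem.List.pyGetD crcDivisor (i + 1) 0))) remainder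
  let remainder := PySem.List.pySetD remainder 7 (PySem.List.pyGetD packet 8 0)
  let remainder := (PySem.List.pyRange 9 (packet.length : Int) 1).foldl (crcStepA packet) remainder
  let remainder :=
    if PySem.List.pyGetD remainder 0 0 ≠ 0 then
      (PySem.List.pyRange 0 8 1).foldl (fun r j =>
        PySem.List.pySetD r j
          (PySem.Int.bxor (PySem.List.pyGetD r j 0) (PySem.List.pyGetD crcDivisor j 0))) remainder
    else remainder
  (PySem.List.pyRange 1 (remainder.length : Int) 1).foldl (fun res i =>
    res ++ [PySem.List.pyGetD remainder i 0]) []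

-- ===== PORT B =====
-- body of B's `for _ in range(9, len(packet))` loop: state = (mask, base); 114 = DIV_LOW, 229 = DIV_ALL
def crcStepB (packet : List Int) (s : Int × Int) (_i : Int) : Int × Int :=
  let mask := s.1
  let base := s.2
  let mask :=
    if PySem.Int.bxor (PySem.List.pyGetD packet base 0) (PySem.Int.band mask 1) ≠ 0 then
      PySem.Int.bxor (mask >>> 1) 114
    else
      mask >>> 1
  (mask, base + 1)

def find_crc_alt (packet : List Int) : List Int :=
  let s := (PySem.List.pyRange 9 (packet.length : Int) 1).foldl (crcStepB packet) (114, 1)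
  let mask := s.1
  let base := s.2
  let mask :=
    if PySem.Int.bxor (PySem.List.pyGetD packet base 0) (PySem.Int.band mask 1) ≠ 0 then
      PySem.Int.bxor mask 229
    else mask
  (PySem.List.pyRange 1 8 1).map (fun j =>
    PySem.Int.bxor (PySem.List.pyGetD packet (base + j) 0) (PySem.Int.band (mask >>> j.toNat) 1))

-- ===== PRECONDITION & SPEC =====
-- A raises IndexError (it reads packet[1]..packet[8]) whenever len(packet) < 9; exactly those inputs are excluded.
def Pre_find_crc (packet : List Int) : Prop := 9 ≤ packet.length
instance (packet : List Int) : Decidable (Pre_find_crc packet) := by unfold Pre_find_crc; infer_instance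
def pvWitness_find_crc : List Int := [0, 0, 0, 0, 0, 0, 0, 0, 0]

def Spec_find_crc (packet : List Int) (out : List Int) : Prop := out = find_crc_alt packet
instance (packet : List Int) (out : List Int) : Decidable (Spec_find_crc packet out) := by unfold Spec_find_crc; infer_instance

-- ===== CLAIM (what is proved, stated in full; the proofs are below) =====
def Claim_equal_find_crc : Prop := ∀ (packet : List Int), Dom_find_crc packet → Pre_find_crc packet → Spec_find_crc packet (find_crc packet)

-- ===== LEMMAS AND PROOFS =====

-- a flip-mask bit is 0 or 1
def crcBit (b : Int) : Prop := b = 0 ∨ b = 1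

-- the mask value whose little-endian bits are b0..b7
def crcMask (b0 b1 b2 b3 b4 b5 b6 b7 : Int) : Int :=
  b0 + 2*b1 + 4*b2 + 8*b3 + 16*b4 + 32*b5 + 64*b6 + 128*b7

-- the remainder list A maintains, decoded from B's state (window start `base`, flip bits b0..b7)
def crcDec (pk : List Int) (base b0 b1 b2 b3 b4 b5 b6 b7 : Int) : List Int :=
  [PySem.Int.bxor (PySem.List.pyGetD pk base 0) b0,
   PySem.Int.bxor (PySem.List.pyGetD pk (base + 1) 0) b1,
   PySem.Int.bxor (PySem.List.pyGetD pk (base + 2) 0) b2,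
   PySem.Int.bxor (PySem.List.pyGetD pk (base + 3) 0) b3,
   PySem.Int.bxor (PySem.List.pyGetD pk (base + 4) 0) b4,
   PySem.Int.bxor (PySem.List.pyGetD pk (base + 5) 0) b5,
   PySem.Int.bxor (PySem.List.pyGetD pk (base + 6) 0) b6,
   PySem.Int.bxor (PySem.List.pyGetD pk (base + 7) 0) b7]

lemma crcMask_facts (b0 b1 b2 b3 b4 b5 b6 b7 : Int)
    (h0 : crcBit b0) (h1 : crcBit b1) (h2 : crcBit b2) (h3 : crcBit b3)
    (h4 : crcBit b4) (h5 : crcBit b5) (h6 : crcBit b6) (h7 : crcBit b7) :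
    PySem.Int.band (crcMask b0 b1 b2 b3 b4 b5 b6 b7) 1 = b0 ∧
    crcMask b0 b1 b2 b3 b4 b5 b6 b7 >>> 1 = crcMask b1 b2 b3 b4 b5 b6 b7 0 ∧
    PySem.Int.bxor (crcMask b0 b1 b2 b3 b4 b5 b6 b7) 114
      = crcMask b0 (1-b1) b2 b3 (1-b4) (1-b5) (1-b6) b7 ∧
    PySem.Int.bxor (crcMask b0 b1 b2 b3 b4 b5 b6 b7) 229
      = crcMask (1-b0) b1 (1-b2) b3 b4 (1-b5) (1-b6) (1-b7) ∧
    PySem.Int.band (crcMask b0 b1 b2 b3 b4 b5 b6 b7 >>> (1 : Nat)) 1 = b1 ∧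
    PySem.Int.band (crcMask b0 b1 b2 b3 b4 b5 b6 b7 >>> (2 : Nat)) 1 = b2 ∧
    PySem.Int.band (crcMask b0 b1 b2 b3 b4 b5 b6 b7 >>> (3 : Nat)) 1 = b3 ∧
    PySem.Int.band (crcMask b0 b1 b2 b3 b4 b5 b6 b7 >>> (4 : Nat)) 1 = b4 ∧
    PySem.Int.band (crcMask b0 b1 b2 b3 b4 b5 b6 b7 >>> (5 : Nat)) 1 = b5 ∧
    PySem.Int.band (crcMask b0 b1 b2 b3 b4 b5 b6 b7 >>> (6 : Nat)) 1 = b6 ∧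
    PySem.Int.band (crcMask b0 b1 b2 b3 b4 b5 b6 b7 >>> (7 : Nat)) 1 = b7 := by
  rcases h0 with rfl | rfl <;> rcases h1 with rfl | rfl <;> rcases h2 with rfl | rfl <;>
    rcases h3 with rfl | rfl <;> rcases h4 with rfl | rfl <;> rcases h5 with rfl | rfl <;>
    rcases h6 with rfl | rfl <;> rcases h7 with rfl | rfl <;> decide

lemma crcBit_flip (b : Int) (hb : crcBit b) : crcBit (1 - b) := by
  rcases hb with rfl | rfl
  · exact Or.inr (by norm_num)
  · exact Or.inl (by norm_num)

lemma crcFlip (x b : Int) (hb : crcBit b) :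
    PySem.Int.bxor (PySem.Int.bxor x b) 1 = PySem.Int.bxor x (1 - b) := by
  rcases hb with rfl | rfl
  · rw [PySem.Int.bxor_zero]; norm_num
  · norm_num
    unfold PySem.Int.bxor
    split_ifs <;> simp_all <;> omega

lemma g8_0 (a b c d e f g h : Int) : PySem.List.pyGetD [a,b,c,d,e,f,g,h] 0 0 = a := rfl
lemma s8_0 (a b c d e f g h v : Int) : PySem.List.pySetD [a,b,c,d,e,f,g,h] 0 v = [v,b,c,d,e,f,g,h] := rfl
lemma g8_1 (a b c d e f g h : Int) : PySem.List.pyGetD [a,b,c,d,e,f,g,h] 1 0 = b := rfl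
lemma s8_1 (a b c d e f g h v : Int) : PySem.List.pySetD [a,b,c,d,e,f,g,h] 1 v = [a,v,c,d,e,f,g,h] := rfl
lemma g8_2 (a b c d e f g h : Int) : PySem.List.pyGetD [a,b,c,d,e,f,g,h] 2 0 = c := rfl
lemma s8_2 (a b c d e f g h v : Int) : PySem.List.pySetD [a,b,c,d,e,f,g,h] 2 v = [a,b,v,d,e,f,g,h] := rfl
lemma g8_3 (a b c d e f g h : Int) : PySem.List.pyGetD [a,b,c,d,e,f,g,h] 3 0 = d := rfl
lemma s8_3 (a b c d e f g h v : Int) : PySem.List.pySetD [a,b,c,d,e,f,g,h] 3 v = [a,b,c,v,e,f,g,h] := rfl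
lemma g8_4 (a b c d e f g h : Int) : PySem.List.pyGetD [a,b,c,d,e,f,g,h] 4 0 = e := rfl
lemma s8_4 (a b c d e f g h v : Int) : PySem.List.pySetD [a,b,c,d,e,f,g,h] 4 v = [a,b,c,d,v,f,g,h] := rfl
lemma g8_5 (a b c d e f g h : Int) : PySem.List.pyGetD [a,b,c,d,e,f,g,h] 5 0 = f := rfl
lemma s8_5 (a b c d e f g h v : Int) : PySem.List.pySetD [a,b,c,d,e,f,g,h] 5 v = [a,b,c,d,e,v,g,h] := rfl
lemma g8_6 (a b c d e f g h : Int) : PySem.List.pyGetD [a,b,c,d,e,f,g,h] 6 0 = g := rfl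
lemma s8_6 (a b c d e f g h v : Int) : PySem.List.pySetD [a,b,c,d,e,f,g,h] 6 v = [a,b,c,d,e,f,v,h] := rfl
lemma g8_7 (a b c d e f g h : Int) : PySem.List.pyGetD [a,b,c,d,e,f,g,h] 7 0 = h := rfl
lemma s8_7 (a b c d e f g h v : Int) : PySem.List.pySetD [a,b,c,d,e,f,g,h] 7 v = [a,b,c,d,e,f,g,v] := rfl
lemma gdiv (k : Int) : PySem.List.pyGetD crcDivisor k 0 = PySem.List.pyGetD [1,0,1,0,0,1,1,1] k 0 := rfl

-- one step: A's list step on the decoded remainder matches B's mask/base step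
lemma crcStep_pair (pk : List Int) (base b0 b1 b2 b3 b4 b5 b6 b7 : Int)
    (h0 : crcBit b0) (h1 : crcBit b1) (h2 : crcBit b2) (h3 : crcBit b3)
    (h4 : crcBit b4) (h5 : crcBit b5) (h6 : crcBit b6) (h7 : crcBit b7) :
    ∃ c0 c1 c2 c3 c4 c5 c6 c7,
      (crcBit c0 ∧ crcBit c1 ∧ crcBit c2 ∧ crcBit c3 ∧ crcBit c4 ∧ crcBit c5 ∧ crcBit c6 ∧ crcBit c7) ∧
      crcStepB pk (crcMask b0 b1 b2 b3 b4 b5 b6 b7, base) (base + 8)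
        = (crcMask c0 c1 c2 c3 c4 c5 c6 c7, base + 1) ∧
      crcStepA pk (crcDec pk base b0 b1 b2 b3 b4 b5 b6 b7) (base + 8)
        = crcDec pk (base + 1) c0 c1 c2 c3 c4 c5 c6 c7 := by
  obtain ⟨hband, hshift, -, -, -⟩ := crcMask_facts b0 b1 b2 b3 b4 b5 b6 b7 h0 h1 h2 h3 h4 h5 h6 h7
  obtain ⟨-, -, hx114, -, -⟩ := crcMask_facts b1 b2 b3 b4 b5 b6 b7 0 h1 h2 h3 h4 h5 h6 h7 (Or.inl rfl)
  have hb0 : crcBit (0 : Int) := Or.inl rfl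
  by_cases hc : PySem.Int.bxor (PySem.List.pyGetD pk base 0) b0 ≠ 0
  · refine ⟨b1, 1-b2, b3, b4, 1-b5, 1-b6, 1-b7, 0,
      ⟨h1, crcBit_flip _ h2, h3, h4, crcBit_flip _ h5, crcBit_flip _ h6, crcBit_flip _ h7, hb0⟩, ?_, ?_⟩
    · unfold crcStepB
      simp only [hband, hshift, hx114, if_pos hc]
    · unfold crcStepA crcDec
      rw [show PySem.List.pyRange 0 7 1 = [0,1,2,3,4,5,6] from by decide]
      rw [g8_0, if_pos hc]
      simp only [List.foldl_cons, List.foldl_nil]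
      norm_num [g8_0, g8_1, g8_2, g8_3, g8_4, g8_5, g8_6, g8_7,
        s8_0, s8_1, s8_2, s8_3, s8_4, s8_5, s8_6, s8_7, gdiv,
        PySem.Int.bxor_zero, crcFlip _ _ h2, crcFlip _ _ h5, crcFlip _ _ h6, crcFlip _ _ h7]
      and_intros <;> first | trivial | ring_nf
  · refine ⟨b1, b2, b3, b4, b5, b6, b7, 0,
      ⟨h1, h2, h3, h4, h5, h6, h7, hb0⟩, ?_, ?_⟩
    · unfold crcStepB
      simp only [hband, hshift, if_neg hc]
    · unfold crcStepA crcDec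
      rw [show PySem.List.pyRange 0 7 1 = [0,1,2,3,4,5,6] from by decide]
      rw [g8_0, if_neg hc]
      simp only [List.foldl_cons, List.foldl_nil]
      norm_num [g8_0, g8_1, g8_2, g8_3, g8_4, g8_5, g8_6, g8_7,
        s8_0, s8_1, s8_2, s8_3, s8_4, s8_5, s8_6, s8_7, gdiv, PySem.Int.bxor_zero]
      and_intros <;> first | trivial | ring_nf

-- the whole loop: both folds over the same index range stay related by crcDec
lemma crcLoop_pair (pk : List Int) : ∀ (m : Nat) (base b0 b1 b2 b3 b4 b5 b6 b7 : Int),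
    crcBit b0 → crcBit b1 → crcBit b2 → crcBit b3 → crcBit b4 → crcBit b5 → crcBit b6 → crcBit b7 →
    ∃ c0 c1 c2 c3 c4 c5 c6 c7,
      (crcBit c0 ∧ crcBit c1 ∧ crcBit c2 ∧ crcBit c3 ∧ crcBit c4 ∧ crcBit c5 ∧ crcBit c6 ∧ crcBit c7) ∧
      (PySem.List.pyRange (base + 8) (base + 8 + m) 1).foldl (crcStepA pk)
          (crcDec pk base b0 b1 b2 b3 b4 b5 b6 b7)
        = crcDec pk (base + m) c0 c1 c2 c3 c4 c5 c6 c7 ∧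
      (PySem.List.pyRange (base + 8) (base + 8 + m) 1).foldl (crcStepB pk)
          (crcMask b0 b1 b2 b3 b4 b5 b6 b7, base)
        = (crcMask c0 c1 c2 c3 c4 c5 c6 c7, base + m) := by
  intro m
  induction m with
  | zero =>
    intro base b0 b1 b2 b3 b4 b5 b6 b7 h0 h1 h2 h3 h4 h5 h6 h7
    exact ⟨b0, b1, b2, b3, b4, b5, b6, b7, ⟨h0, h1, h2, h3, h4, h5, h6, h7⟩,
      by simp [PySem.List.pyRange], by simp [PySem.List.pyRange]⟩
  | succ m ih =>
    intro base b0 b1 b2 b3 b4 b5 b6 b7 h0 h1 h2 h3 h4 h5 h6 h7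
    rw [PySem.List.pyRange_one_cons (by push_cast; omega)]
    obtain ⟨c0, c1, c2, c3, c4, c5, c6, c7, hcb, hstA, hstB⟩ :=
      crcStep_pair pk base b0 b1 b2 b3 b4 b5 b6 b7 h0 h1 h2 h3 h4 h5 h6 h7
    obtain ⟨d0, d1, d2, d3, d4, d5, d6, d7, hdb, hA, hB⟩ :=
      ih (base + 1) c0 c1 c2 c3 c4 c5 c6 c7 hcb.1 hcb.2.1 hcb.2.2.1 hcb.2.2.2.1
        hcb.2.2.2.2.1 hcb.2.2.2.2.2.1 hcb.2.2.2.2.2.2.1 hcb.2.2.2.2.2.2.2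
    have hr : PySem.List.pyRange (base + 8 + 1) (base + 8 + (↑(m + 1) : Int)) 1
        = PySem.List.pyRange (base + 1 + 8) (base + 1 + 8 + (↑m : Int)) 1 := by
      congr 1 <;> push_cast <;> ring
    have hfin : base + 1 + (↑m : Int) = base + (↑(m + 1) : Int) := by push_cast; ring
    refine ⟨d0, d1, d2, d3, d4, d5, d6, d7, hdb, ?_, ?_⟩
    · rw [List.foldl_cons, hstB, hr, hA, hfin]
    · rw [List.foldl_cons, hstA, hr, hB, hfin]

-- A's trailing result-extraction loop on an explicit 8-list
lemma crcResult_eq (a b c d e f g h : Int) :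
    (PySem.List.pyRange 1 (([a,b,c,d,e,f,g,h] : List Int).length : Int) 1).foldl (fun res i =>
      res ++ [PySem.List.pyGetD [a,b,c,d,e,f,g,h] i 0]) []
    = [b,c,d,e,f,g,h] := by
  rw [show ((([a,b,c,d,e,f,g,h] : List Int).length : Nat) : Int) = 8 from by norm_num,
      show PySem.List.pyRange 1 8 1 = [1,2,3,4,5,6,7] from by decide]
  simp only [List.foldl_cons, List.foldl_nil]
  norm_num [g8_1, g8_2, g8_3, g8_4, g8_5, g8_6, g8_7]

-- ===== VERDICT (by name: the statement is the Claim_ definition above) =====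
set_option maxHeartbeats 1600000 in
theorem find_crc_spec : Claim_equal_find_crc := by
  intro packet _hdom hpre
  unfold Spec_find_crc
  unfold Pre_find_crc at hpre
  obtain ⟨p0, p1, p2, p3, p4, p5, p6, p7, p8, rest, rfl⟩ :
      ∃ p0 p1 p2 p3 p4 p5 p6 p7 p8 rest,
        packet = p0 :: p1 :: p2 :: p3 :: p4 :: p5 :: p6 :: p7 :: p8 :: rest := by
    match packet, hpre with
    | p0 :: p1 :: p2 :: p3 :: p4 :: p5 :: p6 :: p7 :: p8 :: rest, _ =>
      exact ⟨p0, p1, p2, p3, p4, p5, p6, p7, p8, rest, rfl⟩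
  set pk := p0 :: p1 :: p2 :: p3 :: p4 :: p5 :: p6 :: p7 :: p8 :: rest with hpk
  -- A's initial remainder is the decoded form of B's initial state (mask 114 = bits 0 1 0 0 1 1 1 0)
  have hinitA : PySem.List.pySetD ((PySem.List.pyRange 0 7 1).foldl (fun r i =>
      PySem.List.pySetD r i
        (PySem.Int.bxor (PySem.List.pyGetD pk (i + 1) 0) (PySem.List.pyGetD crcDivisor (i + 1) 0)))
      (PySem.List.pyRange 0 8 1)) 7 (PySem.List.pyGetD pk 8 0)
      = crcDec pk 1 0 1 0 0 1 1 1 0 := by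
    rw [show PySem.List.pyRange 0 7 1 = [0,1,2,3,4,5,6] from by decide,
        show PySem.List.pyRange 0 8 1 = [0,1,2,3,4,5,6,7] from by decide]
    simp only [List.foldl_cons, List.foldl_nil, hpk]
    norm_num [crcDec, PySem.List.pyGetD_ofNat', gdiv, g8_0, g8_1, g8_2, g8_3, g8_4, g8_5, g8_6, g8_7,
      s8_0, s8_1, s8_2, s8_3, s8_4, s8_5, s8_6, s8_7, List.getD, crcDivisor, PySem.Int.bxor_zero]
  have hb0 : crcBit (0:Int) := Or.inl rfl
  have hb1 : crcBit (1:Int) := Or.inr rfl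
  obtain ⟨c0, c1, c2, c3, c4, c5, c6, c7, hcb, hA, hB⟩ :=
    crcLoop_pair pk rest.length 1 0 1 0 0 1 1 1 0 hb0 hb1 hb0 hb0 hb1 hb1 hb1 hb0
  obtain ⟨hc0, hc1, hc2, hc3, hc4, hc5, hc6, hc7⟩ := hcb
  have hrlen : ((pk.length : Nat) : Int) = 1 + 8 + (rest.length : Int) := by
    simp only [hpk, List.length_cons]; push_cast; ring
  have hloopA : (PySem.List.pyRange 9 (pk.length : Int) 1).foldl (crcStepA pk)
      (crcDec pk 1 0 1 0 0 1 1 1 0) = crcDec pk (1 + (rest.length : Int)) c0 c1 c2 c3 c4 c5 c6 c7 := by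
    rw [show (9:Int) = 1 + 8 from by norm_num, hrlen]; exact hA
  have hloopB : (PySem.List.pyRange 9 (pk.length : Int) 1).foldl (crcStepB pk)
      ((114 : Int), (1 : Int)) = (crcMask c0 c1 c2 c3 c4 c5 c6 c7, 1 + (rest.length : Int)) := by
    rw [show (9:Int) = 1 + 8 from by norm_num, hrlen,
        show (114 : Int) = crcMask 0 1 0 0 1 1 1 0 from by decide]
    exact hB
  obtain ⟨fband, -, -, f229, f1, f2, f3, f4, f5, f6, f7⟩ :=
    crcMask_facts c0 c1 c2 c3 c4 c5 c6 c7 hc0 hc1 hc2 hc3 hc4 hc5 hc6 hc7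
  obtain ⟨-, -, -, -, e1, e2, e3, e4, e5, e6, e7⟩ :=
    crcMask_facts (1-c0) c1 (1-c2) c3 c4 (1-c5) (1-c6) (1-c7)
      (crcBit_flip _ hc0) hc1 (crcBit_flip _ hc2) hc3 hc4
      (crcBit_flip _ hc5) (crcBit_flip _ hc6) (crcBit_flip _ hc7)
  set B := (1 : Int) + (rest.length : Int) with hBdef
  show (let remainder := PySem.List.pyRange 0 8 1
    let remainder := (PySem.List.pyRange 0 7 1).foldl (fun r i =>
      PySem.List.pySetD r i
        (PySem.Int.bxor (PySem.List.pyGetD pk (i + 1) 0) (PySem.List.pyGetD crcDivisor (i + 1) 0))) remainder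
    let remainder := PySem.List.pySetD remainder 7 (PySem.List.pyGetD pk 8 0)
    let remainder := (PySem.List.pyRange 9 (pk.length : Int) 1).foldl (crcStepA pk) remainder
    let remainder :=
      if PySem.List.pyGetD remainder 0 0 ≠ 0 then
        (PySem.List.pyRange 0 8 1).foldl (fun r j =>
          PySem.List.pySetD r j
            (PySem.Int.bxor (PySem.List.pyGetD r j 0) (PySem.List.pyGetD crcDivisor j 0))) remainder
      else remainder
    (PySem.List.pyRange 1 (remainder.length : Int) 1).foldl (fun res i =>
      res ++ [PySem.List.pyGetD remainder i 0]) []) = _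
  simp only [hinitA, hloopA]
  show _ = (let s := (PySem.List.pyRange 9 (pk.length : Int) 1).foldl (crcStepB pk) (114, 1)
    let mask := s.1
    let base := s.2
    let mask :=
      if PySem.Int.bxor (PySem.List.pyGetD pk base 0) (PySem.Int.band mask 1) ≠ 0 then
        PySem.Int.bxor mask 229
      else mask
    (PySem.List.pyRange 1 8 1).map (fun j =>
      PySem.Int.bxor (PySem.List.pyGetD pk (base + j) 0) (PySem.Int.band (mask >>> j.toNat) 1)))
  simp only [hloopB]
  simp only [fband]
  rw [show PySem.List.pyGetD (crcDec pk B c0 c1 c2 c3 c4 c5 c6 c7) 0 0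
      = PySem.Int.bxor (PySem.List.pyGetD pk B 0) c0 from by unfold crcDec; rw [g8_0]]
  rw [show PySem.List.pyRange 1 8 1 = [1,2,3,4,5,6,7] from by decide]
  by_cases hcond : PySem.Int.bxor (PySem.List.pyGetD pk B 0) c0 ≠ 0
  · rw [if_pos hcond, if_pos hcond, f229]
    rw [show PySem.List.pyRange 0 8 1 = [0,1,2,3,4,5,6,7] from by decide]
    unfold crcDec
    simp only [List.foldl_cons, List.foldl_nil, List.map_cons, List.map_nil]
    norm_num [g8_0, g8_1, g8_2, g8_3, g8_4, g8_5, g8_6, g8_7,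
      s8_0, s8_1, s8_2, s8_3, s8_4, s8_5, s8_6, s8_7, gdiv, PySem.Int.bxor_zero,
      crcFlip _ _ hc0, crcFlip _ _ hc2, crcFlip _ _ hc5, crcFlip _ _ hc6, crcFlip _ _ hc7,
      crcResult_eq, Int.toNat_one, e1, e2, e3, e4, e5, e6, e7]
    rw [show PySem.List.pyRange 1 8 1 = [1,2,3,4,5,6,7] from by decide]
    simp [show Int.toNat 2 = 2 from rfl, show Int.toNat 3 = 3 from rfl, show Int.toNat 4 = 4 from rfl, show Int.toNat 5 = 5 from rfl, show Int.toNat 6 = 6 from rfl, show Int.toNat 7 = 7 from rfl, e2, e3, e4, e5, e6, e7, g8_1, g8_2, g8_3, g8_4, g8_5, g8_6, g8_7]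
  · rw [if_neg hcond, if_neg hcond]
    unfold crcDec
    simp only [List.map_cons, List.map_nil]
    norm_num [crcResult_eq, Int.toNat_one, f1, f2, f3, f4, f5, f6, f7]
    rw [show PySem.List.pyRange 1 8 1 = [1,2,3,4,5,6,7] from by decide]
    simp [show Int.toNat 2 = 2 from rfl, show Int.toNat 3 = 3 from rfl, show Int.toNat 4 = 4 from rfl, show Int.toNat 5 = 5 from rfl, show Int.toNat 6 = 6 from rfl, show Int.toNat 7 = 7 from rfl, f2, f3, f4, f5, f6, f7, g8_1, g8_2, g8_3, g8_4, g8_5, g8_6, g8_7]
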